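-- pv_equiv track=rewrite | github.com/glassk/algorithm | Programmars/Level_3/110 옮기기.py | solution
-- ===== SOURCE A (Python) =====
-- from collections import deque
--
-- def solution(s):
--     answer = []
--     for string in s:
--         stack = []
--         count = 0
--         for char in string:
--             if char == '0':
--                 if stack[-2:] == ['1', '1']:
--                     count += 1
--                     stack.pop()
--                     stack.pop()
--                 else:
--                     stack.append(char)
--             else:
--                 stack.append(char)
--
--         if count == 0:
--             answer.append(string)
--         else:
--             temp = deque()
--             while stack:
--                 if stack[-1] == '1':
--                     temp.append(stack.pop())
--                 elif stack[-1] == '0':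
--                     break
--
--             while count > 0:
--                 temp.appendleft('0')
--                 temp.appendleft('1')
--                 temp.appendleft('1')
--                 count -= 1
--             while stack:
--                 temp.appendleft(stack.pop())
--             answer.append(''.join(map(str, temp)))
--
--     return answer
-- ===== SOURCE B (Python) =====
-- def solution(s):
--     answer = []
--     for string in s:
--         reduced = string
--         idx = reduced.find('110')
--         while idx != -1:
--             reduced = reduced[:idx] + reduced[idx + 3:]
--             idx = reduced.find('110')
--         count = (len(string) - len(reduced)) // 3
--         if count == 0:
--             answer.append(string)
--         else:
--             zero = reduced.rfind('0')
--             answer.append(reduced[:zero + 1] + '110' * count + reduced[zero + 1:])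
--     return answer
-- ===== Notes on version B (the rewrite author's own statement) =====
-- stated objective: alternative
-- what changed: B reduces each string by repeatedly deleting the leftmost '110' substring found with str.find and string slicing, reads the removal count off the length difference, and rebuilds the answer with a single rfind('0') splice, replacing A's character-by-character stack scan plus deque with three while-loops.
-- outside the precondition, e.g. on solution(['110a']): A does not finish within the time limit, B returns ['110a']; on solution(['a01101']): A returns ['a01101'], B returns ['a01101']
import Mathlib
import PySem

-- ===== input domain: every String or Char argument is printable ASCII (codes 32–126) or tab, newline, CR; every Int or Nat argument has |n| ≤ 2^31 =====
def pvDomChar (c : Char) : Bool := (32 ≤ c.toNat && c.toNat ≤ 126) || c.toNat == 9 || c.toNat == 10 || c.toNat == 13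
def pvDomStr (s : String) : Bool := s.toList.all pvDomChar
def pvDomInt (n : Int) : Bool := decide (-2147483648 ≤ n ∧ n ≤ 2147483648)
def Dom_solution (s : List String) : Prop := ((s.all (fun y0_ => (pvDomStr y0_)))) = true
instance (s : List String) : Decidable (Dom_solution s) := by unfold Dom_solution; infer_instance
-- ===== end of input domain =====

-- B replaces A's one-pass stack reduction + deque reconstruction (three while-loops) by
-- repeated deletion of the leftmost "110" substring, a count read off the length difference,
-- and a single rfind-based splice; objective: alternative (not claimed faster).

-- ===== PORT A =====
-- The stack is kept TOP-FIRST (head = Python's stack[-1]); Python's append/pop at the right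
-- end become cons/drop at the head, and stack[-2:] == ['1','1'] becomes take 2 = ['1','1'].
def stepA (st : List Char × Int) (c : Char) : List Char × Int :=
  if c = '0' then
    if st.1.take 2 = ['1', '1'] then (st.1.drop 2, st.2 + 1)
    else (c :: st.1, st.2)
  else (c :: st.1, st.2)

-- first while-loop: pop onto temp while the top is '1', break on '0'.  On any other top char
-- Python's loop never terminates (such inputs lie outside Pre_solution); the port stops there.
def popOnes : List Char → List Char × List Char
  | [] => ([], [])
  | c :: rest =>
      if c = '1' then
        let p := popOnes rest
        (c :: p.1, p.2)
      else ([], c :: rest)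

-- second while-loop: while count > 0, appendleft '0','1','1' (i.e. prepend "110")
def fill110 (count : Int) (temp : List Char) : List Char :=
  if 0 < count then fill110 (count - 1) ('1' :: '1' :: '0' :: temp) else temp
  termination_by count.toNat
  decreasing_by omega

def solveA (string : String) : String :=
  let r := string.toList.foldl stepA ([], 0)
  if r.2 = 0 then string
  else
    let p := popOnes r.1
    let temp := fill110 r.2 p.1
    -- third while-loop: while stack, appendleft stack.pop()
    String.ofList (p.2.foldl (fun t c => c :: t) temp)

def solution (s : List String) : List String :=
  s.foldl (fun answer string => answer ++ [solveA string]) []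

-- ===== PORT B =====
-- while '110' is found, delete its leftmost occurrence via slicing
def bReduce (r : List Char) : List Char :=
  let idx := PySem.Chars.find r ['1', '1', '0']
  if idx = -1 then r
  else
    bReduce (PySem.List.slice r none (some idx) ++ PySem.List.slice r (some (idx + 3)) none)
  termination_by r.length
  decreasing_by
    rename_i h
    have h0 : 0 ≤ PySem.Chars.find r ['1', '1', '0'] :=
      (PySem.Chars.find_nonneg_iff r ['1', '1', '0']).2
        ((PySem.Chars.find_ne_neg_one_iff r ['1', '1', '0']).1 h)
    have hpre := (PySem.Chars.find_spec h0).1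
    have hlen : (PySem.Chars.find r ['1', '1', '0']).toNat + 3 ≤ r.length := by
      have := hpre.length_le
      simp at this
      omega
    rw [PySem.List.slice_to r h0, PySem.List.slice_from r (by omega : (0:Int) ≤ idx + 3)]
    have h3 : (idx + 3).toNat = idx.toNat + 3 := by omega
    simp [h3]
    omega

def solveB (string : String) : String :=
  let reduced := bReduce string.toList
  let count := PySem.Int.floordiv ((string.toList.length : Int) - (reduced.length : Int)) 3
  if count = 0 then string
  else
    let zero := PySem.Chars.rfind reduced ['0']
    String.ofList (PySem.List.slice reduced none (some (zero + 1)) ++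
      PySem.List.pyRepeat ['1', '1', '0'] count ++
      PySem.List.slice reduced (some (zero + 1)) none)

def solution_alt (s : List String) : List String := s.map solveB

-- ===== PRECONDITION & SPEC =====
-- Pre_ excludes strings containing both "110" and a character other than '0'/'1': on some of
-- them (e.g. "110a") A's reconstruction while-loop never terminates; on every such input on
-- which A does return, A and B in fact agree, so Pre_ is narrower than its reason.
def Pre_solution (s : List String) : Prop :=
  ∀ w ∈ s, (w.toList.all (fun c => c == '0' || c == '1')) = true ∨
    PySem.Chars.isIn ['1', '1', '0'] w.toList = false
instance (s : List String) : Decidable (Pre_solution s) := by unfold Pre_solution; infer_instance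

def pvWitness_solution : List String := ["1100110", "abc", "0101"]

def Spec_solution (s : List String) (out : List String) : Prop := out = solution_alt s
instance (s : List String) (out : List String) : Decidable (Spec_solution s out) := by
  unfold Spec_solution; infer_instance

-- ===== CLAIM (what is proved, stated in full; the proofs are below) =====
def Claim_equal_solution : Prop :=
  ∀ (s : List String), Dom_solution s → Pre_solution s → Spec_solution s (solution s)

-- ===== LEMMAS AND PROOFS =====

-- the count accumulator never influences the branches: shifting it shifts the result's count
theorem stepA_shift (x : Char) (σ : List Char) (c d : Int) :
    stepA (σ, c + d) x = ((stepA (σ, c) x).1, (stepA (σ, c) x).2 + d) := by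
  simp only [stepA]
  split_ifs <;> simp [Int.add_right_comm]

theorem foldl_stepA_shift (cs : List Char) (σ : List Char) (c d : Int) :
    cs.foldl stepA (σ, c + d) = ((cs.foldl stepA (σ, c)).1, (cs.foldl stepA (σ, c)).2 + d) := by
  induction cs generalizing σ c with
  | nil => simp
  | cons x cs ih =>
      simp only [List.foldl_cons, stepA_shift]
      exact ih (stepA (σ, c) x).1 (stepA (σ, c) x).2

-- processing a literal "110" from any state removes it and bumps the count
theorem foldl_stepA_fire (v : List Char) (σ : List Char) (c : Int) :
    ('1' :: '1' :: '0' :: v).foldl stepA (σ, c) = v.foldl stepA (σ, c + 1) := by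
  simp [List.foldl_cons, stepA]

-- a string whose (reversed-stack ++ rest) view is "110"-free is pushed verbatim
theorem foldl_stepA_free (cs : List Char) (σ : List Char) (c : Int)
    (h : ¬ (['1', '1', '0'] <:+: (σ.reverse ++ cs))) :
    cs.foldl stepA (σ, c) = (cs.reverse ++ σ, c) := by
  induction cs generalizing σ with
  | nil => simp
  | cons x cs ih =>
      by_cases hx : x = '0' ∧ σ.take 2 = ['1', '1']
      · obtain ⟨hx0, htake⟩ := hx
        exfalso
        obtain ⟨a, b, σ', rfl⟩ : ∃ a b σ', σ = a :: b :: σ' := by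
          cases σ with
          | nil => simp at htake
          | cons a σ1 =>
              cases σ1 with
              | nil => simp at htake
              | cons b σ' => exact ⟨a, b, σ', rfl⟩
        simp at htake
        obtain ⟨ha, hb⟩ := htake
        apply h
        refine ⟨σ'.reverse, cs, ?_⟩
        subst hx0 ha hb
        simp
      · have hstep : stepA (σ, c) x = (x :: σ, c) := by
          simp only [stepA]
          rcases Decidable.em (x = '0') with h0 | h0
          · have : ¬ σ.take 2 = ['1', '1'] := fun ht => hx ⟨h0, ht⟩
            simp [h0, this]
          · simp [h0]
        rw [List.foldl_cons, hstep, ih (x :: σ) (by simpa using h)]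
        simp

-- every element of the final stack comes from the input or the initial stack
theorem foldl_stepA_mem (cs : List Char) (σ : List Char) (c : Int) (x : Char)
    (hx : x ∈ (cs.foldl stepA (σ, c)).1) : x ∈ cs ∨ x ∈ σ := by
  induction cs generalizing σ c with
  | nil => exact Or.inr (by simpa using hx)
  | cons y cs ih =>
      rw [List.foldl_cons] at hx
      rcases ih (stepA (σ, c) y).1 (stepA (σ, c) y).2 (by simpa using hx) with h | h
      · exact Or.inl (List.mem_cons_of_mem y h)
      · simp only [stepA] at h
        split_ifs at h with h1 h2
        · exact Or.inr (List.mem_of_mem_drop h)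
        · rcases List.mem_cons.1 h with h | h
          · exact Or.inl (by simp [h])
          · exact Or.inr h
        · rcases List.mem_cons.1 h with h | h
          · exact Or.inl (by simp [h])
          · exact Or.inr h

-- the count accumulator never decreases
theorem foldl_stepA_count_mono (cs : List Char) (σ : List Char) (c : Int) :
    c ≤ (cs.foldl stepA (σ, c)).2 := by
  induction cs generalizing σ c with
  | nil => simp
  | cons x cs ih =>
      rw [List.foldl_cons]
      have hstep : c ≤ (stepA (σ, c) x).2 := by
        simp only [stepA]; split_ifs <;> simp
      calc c ≤ (stepA (σ, c) x).2 := hstep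
        _ ≤ _ := by
            rcases stepA (σ, c) x with ⟨σ', c'⟩
            exact ih σ' c'

-- A's fold computes B's reduction (reversed) and a count fixed by the length difference
theorem bReduce_spec_aux : ∀ (n : Nat) (r : List Char), r.length ≤ n →
    (r.foldl stepA ([], 0)).1 = (bReduce r).reverse ∧
      3 * (r.foldl stepA ([], 0)).2 = (r.length : Int) - ((bReduce r).length : Int) := by
  intro n
  induction n with
  | zero =>
      intro r hr
      have : r = [] := List.eq_nil_of_length_eq_zero (by omega)
      subst this
      rw [bReduce]
      have hf : PySem.Chars.find [] ['1', '1', '0'] = -1 := by decide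
      simp [hf]
  | succ n ih =>
      intro r hr
      by_cases hfind : PySem.Chars.find r ['1', '1', '0'] = -1
      · have hred : bReduce r = r := by rw [bReduce]; simp [hfind]
        have hfree := foldl_stepA_free r [] 0
          (by simpa using (PySem.Chars.find_eq_neg_one_iff r ['1', '1', '0']).1 hfind)
        rw [hred, hfree]
        simp
      · have h0 : 0 ≤ PySem.Chars.find r ['1', '1', '0'] :=
          (PySem.Chars.find_nonneg_iff r ['1', '1', '0']).2
            ((PySem.Chars.find_ne_neg_one_iff r ['1', '1', '0']).1 hfind)
        set idx := PySem.Chars.find r ['1', '1', '0'] with hidx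
        have hpre := (PySem.Chars.find_spec h0).1
        obtain ⟨t, ht⟩ := hpre
        have hlen3 : idx.toNat + 3 ≤ r.length := by
          have := congrArg List.length ht
          simp at this
          omega
        have ht' : t = r.drop (idx.toNat + 3) := by
          have h := congrArg (List.drop 3) ht
          simp only [List.drop_drop] at h
          simpa [Nat.add_comm] using h
        have hdecomp : r = r.take idx.toNat ++ ('1' :: '1' :: '0' :: t) := by
          conv_lhs => rw [← List.take_append_drop idx.toNat r, ← ht]
          simp
        have hred : bReduce r = bReduce (r.take idx.toNat ++ t) := by
          rw [bReduce]
          simp only [← hidx, hfind]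
          rw [PySem.List.slice_to r h0, PySem.List.slice_from r (by omega : (0:Int) ≤ idx + 3)]
          have : (idx + 3).toNat = idx.toNat + 3 := by omega
          rw [this, ← ht']
          simp
        set u := r.take idx.toNat with hu
        have hfold : r.foldl stepA ([], 0) =
            (((u ++ t).foldl stepA ([], 0)).1, ((u ++ t).foldl stepA ([], 0)).2 + 1) := by
          conv_lhs => rw [hdecomp]
          rw [List.foldl_append, foldl_stepA_fire, List.foldl_append]
          rcases hσ : u.foldl stepA ([], 0) with ⟨σu, cu⟩
          rw [foldl_stepA_shift t σu cu 1]
        have hlenut : (u ++ t).length ≤ n := by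
          have hut : (u ++ t).length = r.length - 3 := by
            have h1 : u.length = idx.toNat := by
              rw [hu, List.length_take]; omega
            have h2 : t.length = r.length - (idx.toNat + 3) := by
              rw [ht']; simp
            simp [h1, h2]; omega
          omega
        obtain ⟨ihs, ihc⟩ := ih (u ++ t) hlenut
        constructor
        · rw [hfold, hred]; exact ihs
        · rw [hfold, hred]
          have hlr : (r.length : Int) = ((u ++ t).length : Int) + 3 := by
            have h1 : u.length = idx.toNat := by rw [hu, List.length_take]; omega
            have h2 : t.length = r.length - (idx.toNat + 3) := by rw [ht']; simp
            simp [h1, h2]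
            omega
          rw [hlr]
          omega

theorem bReduce_spec (r : List Char) :
    (r.foldl stepA ([], 0)).1 = (bReduce r).reverse ∧
      3 * (r.foldl stepA ([], 0)).2 = (r.length : Int) - ((bReduce r).length : Int) :=
  bReduce_spec_aux r.length r le_rfl

-- popOnes on a run of '1's followed by [] or something that is not '1'
theorem popOnes_replicate (m : Nat) (l : List Char)
    (hl : l = [] ∨ ∃ hd tl, l = hd :: tl ∧ hd ≠ '1') :
    popOnes (List.replicate m '1' ++ l) = (List.replicate m '1', l) := by
  induction m with
  | zero =>
      rcases hl with h | ⟨hd, tl, h, hne⟩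
      · simp [h, popOnes]
      · simp [h, popOnes, hne]
  | succ m ih =>
      simp [List.replicate_succ, popOnes, ih]

theorem fill110_eq (n : Nat) : ∀ (temp : List Char),
    fill110 (n : Int) temp = (List.replicate n ['1', '1', '0']).flatten ++ temp := by
  induction n with
  | zero => intro temp; rw [fill110]; simp
  | succ n ih =>
      intro temp
      rw [fill110]
      have hpos : (0 : Int) < ((n + 1 : Nat) : Int) := by positivity
      rw [if_pos hpos]
      have : ((n + 1 : Nat) : Int) - 1 = (n : Int) := by push_cast; ring
      rw [this, ih ('1' :: '1' :: '0' :: temp)]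
      have hcomm : ∀ (k : Nat),
          (List.replicate k ['1', '1', '0']).flatten ++ ['1', '1', '0'] =
            '1' :: '1' :: '0' :: (List.replicate k ['1', '1', '0']).flatten := by
        intro k
        induction k with
        | zero => simp
        | succ k ihk => simp [List.replicate_succ, List.flatten_cons, ihk]
      calc (List.replicate n ['1', '1', '0']).flatten ++ '1' :: '1' :: '0' :: temp
          = ((List.replicate n ['1', '1', '0']).flatten ++ ['1', '1', '0']) ++ temp := by simp
        _ = ('1' :: '1' :: '0' :: (List.replicate n ['1', '1', '0']).flatten) ++ temp := by
              rw [hcomm]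
        _ = (List.replicate (n + 1) ['1', '1', '0']).flatten ++ temp := by
              simp [List.replicate_succ, List.flatten_cons]

theorem foldl_cons_rev (l acc : List Char) :
    l.foldl (fun t c => c :: t) acc = l.reverse ++ acc := by
  induction l generalizing acc with
  | nil => simp
  | cons x l ih => simp [List.foldl_cons, ih]

-- rfind.go on a single-character needle
theorem prefix_zero_iff (l : List Char) :
    (['0'].isPrefixOf l = true) ↔ ∃ t, l = '0' :: t := by
  rw [List.isPrefixOf_iff_prefix]
  cases l with
  | nil => simp
  | cons x t =>
      constructor
      · intro h
        have := (List.cons_prefix_cons.1 h).1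
        exact ⟨t, by simp [← this]⟩
      · rintro ⟨t', ht'⟩
        rw [ht']
        exact (List.cons_prefix_cons).2 ⟨rfl, List.nil_prefix⟩

theorem rfind_go_no_zero (s : List Char) (h : '0' ∉ s) :
    ∀ k, PySem.Chars.rfind.go s ['0'] k = -1 := by
  intro k
  induction k with
  | zero =>
      rw [PySem.Chars.rfind.go]
      have : ¬ (['0'].isPrefixOf s = true) := by
        intro hp
        obtain ⟨t, ht⟩ := (prefix_zero_iff s).1 hp
        exact h (by simp [ht])
      simp [this]
  | succ j ih =>
      rw [PySem.Chars.rfind.go]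
      have : ¬ (['0'].isPrefixOf (s.drop (j + 1)) = true) := by
        intro hp
        obtain ⟨t, ht⟩ := (prefix_zero_iff _).1 hp
        exact h (List.mem_of_mem_drop (l := s) (i := j + 1) (by simp [ht]))
      simp [this, ih]

theorem rfind_no_zero (s : List Char) (h : '0' ∉ s) :
    PySem.Chars.rfind s ['0'] = -1 :=
  rfind_go_no_zero s h s.length

theorem rfind_go_last_zero (u t : List Char) (h0 : '0' ∉ t) :
    ∀ k, u.length ≤ k → k ≤ (u ++ '0' :: t).length →
      PySem.Chars.rfind.go (u ++ '0' :: t) ['0'] k = u.length := by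
  intro k
  induction k with
  | zero =>
      intro hle _
      have hu : u = [] := List.eq_nil_of_length_eq_zero (by omega)
      subst hu
      rw [PySem.Chars.rfind.go]
      have : ['0'].isPrefixOf ('0' :: t) = true := (prefix_zero_iff _).2 ⟨t, rfl⟩
      simp [this]
  | succ j ih =>
      intro hle hub
      rw [PySem.Chars.rfind.go]
      by_cases heq : u.length = j + 1
      · have hdrop : (u ++ '0' :: t).drop (j + 1) = '0' :: t := by
          rw [← heq, List.drop_append, List.drop_length]
          simp
        have : ['0'].isPrefixOf ((u ++ '0' :: t).drop (j + 1)) = true := by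
          rw [hdrop]; exact (prefix_zero_iff _).2 ⟨t, rfl⟩
        simp only [this, if_pos]
        omega
      · have hlt : u.length ≤ j := by omega
        have hdrop : (u ++ '0' :: t).drop (j + 1) = t.drop (j - u.length) := by
          rw [List.drop_append, List.drop_of_length_le (by omega)]
          have : j + 1 - u.length = (j - u.length) + 1 := by omega
          simp [this]
        have hnp : ¬ (['0'].isPrefixOf ((u ++ '0' :: t).drop (j + 1)) = true) := by
          intro hp
          obtain ⟨t', ht'⟩ := (prefix_zero_iff _).1 hp
          rw [hdrop] at ht'
          exact h0 (List.mem_of_mem_drop (l := t) (i := j - u.length) (by simp [ht']))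
        rw [if_neg (by simpa using hnp)]
        exact ih hlt (by omega)

theorem rfind_last_zero (u t : List Char) (h0 : '0' ∉ t) :
    PySem.Chars.rfind (u ++ '0' :: t) ['0'] = u.length := by
  unfold PySem.Chars.rfind
  exact rfind_go_last_zero u t h0 (u ++ '0' :: t).length (by simp) le_rfl

-- last-occurrence decomposition
theorem exists_last_zero (l : List Char) (h : '0' ∈ l) :
    ∃ u t, l = u ++ '0' :: t ∧ '0' ∉ t := by
  induction l using List.reverseRecOn with
  | nil => simp at h
  | append_singleton l a ih =>
      by_cases ha : a = '0'
      · exact ⟨l, [], by simp [ha], by simp⟩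
      · have hl : '0' ∈ l := by
          rcases List.mem_append.1 h with h | h
          · exact h
          · simp at h; exact absurd h.symm ha
        obtain ⟨u, t, hut, hnt⟩ := ih hl
        exact ⟨u, t ++ [a], by simp [hut], by
          intro hc
          rcases List.mem_append.1 hc with hc | hc
          · exact hnt hc
          · simp at hc; exact ha hc.symm⟩

theorem floordiv_three_mul (c : Int) : PySem.Int.floordiv (3 * c) 3 = c := by
  rw [PySem.Int.floordiv_eq_ediv_of_pos (by omega)]
  omega

-- the per-string equivalence
theorem solve_eq (w : String)
    (hw : (∀ c ∈ w.toList, c = '0' ∨ c = '1') ∨ ¬ (['1', '1', '0'] <:+: w.toList)) :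
    solveA w = solveB w := by
  obtain ⟨hstk, hcnt⟩ := bReduce_spec w.toList
  set F := w.toList.foldl stepA ([], 0) with hF
  set red := bReduce w.toList with hred
  have hcountB : PySem.Int.floordiv ((w.toList.length : Int) - (red.length : Int)) 3 = F.2 := by
    rw [← hcnt, floordiv_three_mul]
  by_cases hc0 : F.2 = 0
  · rw [solveA, solveB]
    simp only [← hF, ← hred, hcountB, hc0]
    simp
  · -- count ≠ 0: the string must be binary (else the "110"-free branch of Pre_ forces count 0)
    have hbin : ∀ c ∈ w.toList, c = '0' ∨ c = '1' := by
      rcases hw with h | h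
      · exact h
      · exfalso
        have := foldl_stepA_free w.toList [] 0 (by simpa using h)
        rw [← hF] at this
        exact hc0 (by rw [this])
    have hbinred : ∀ c ∈ red, c = '0' ∨ c = '1' := by
      intro c hc
      have : c ∈ F.1 := by rw [hstk]; simpa using hc
      rcases foldl_stepA_mem w.toList [] 0 c this with h | h
      · exact hbin c h
      · simp at h
    have hc2nn : 0 ≤ F.2 := by
      have := foldl_stepA_count_mono w.toList [] 0
      rw [← hF] at this
      exact this
    rw [solveA, solveB]
    simp only [← hF, ← hred, hcountB, if_neg hc0]
    by_cases hz : '0' ∈ red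
    · obtain ⟨u, t, hut, hnt⟩ := exists_last_zero red hz
      have htone : ∀ c ∈ t, c = '1' := by
        intro c hc
        rcases hbinred c (by simp [hut, hc]) with h | h
        · exact absurd (h ▸ hc) hnt
        · exact h
      have htrep : t = List.replicate t.length '1' := List.eq_replicate_of_mem htone
      have hrev : F.1 = List.replicate t.length '1' ++ '0' :: u.reverse := by
        rw [hstk, hut]
        simp [List.reverse_append]
        rw [htrep]
        simp
      have hpop : popOnes F.1 = (List.replicate t.length '1', '0' :: u.reverse) := by
        rw [hrev]
        exact popOnes_replicate t.length ('0' :: u.reverse)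
          (Or.inr ⟨'0', u.reverse, rfl, by decide⟩)
      have hzero : PySem.Chars.rfind red ['0'] = u.length := by
        rw [hut]; exact rfind_last_zero u t hnt
      rw [hpop, hzero]
      have hfill : fill110 F.2 (List.replicate t.length '1') =
          (List.replicate F.2.toNat ['1', '1', '0']).flatten ++ List.replicate t.length '1' := by
        have h2 : F.2 = (F.2.toNat : Int) := by omega
        rw [h2, fill110_eq]
        have h3 : ((F.2.toNat : Int)).toNat = F.2.toNat := by omega
        rw [h3]
      rw [hfill, foldl_cons_rev]
      congr 1
      have hslice1 : PySem.List.slice red none (some ((u.length : Int) + 1)) = u ++ ['0'] := by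
        rw [PySem.List.slice_to red (by omega : (0:Int) ≤ (u.length : Int) + 1)]
        have : ((u.length : Int) + 1).toNat = u.length + 1 := by omega
        rw [this, hut, List.take_append]
        simp
      have hslice2 : PySem.List.slice red (some ((u.length : Int) + 1)) none = t := by
        rw [PySem.List.slice_from red (by omega : (0:Int) ≤ (u.length : Int) + 1)]
        have : ((u.length : Int) + 1).toNat = u.length + 1 := by omega
        rw [this, hut, List.drop_append]
        simp
      rw [hslice1, hslice2, PySem.List.pyRepeat]
      have : ('0' :: u.reverse).reverse = u ++ ['0'] := by simp
      rw [this]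
      conv_rhs => rw [htrep]
      simp
    · -- no '0' left: the reduced string is all '1's
      have hrep : red = List.replicate red.length '1' := by
        apply List.eq_replicate_of_mem
        intro c hc
        rcases hbinred c hc with h | h
        · exact absurd (h ▸ hc) hz
        · exact h
      have hrev : F.1 = List.replicate red.length '1' := by
        rw [hstk]
        conv_lhs => rw [hrep]
        simp
      have hpop : popOnes F.1 = (List.replicate red.length '1', []) := by
        rw [hrev]
        simpa using popOnes_replicate red.length [] (Or.inl rfl)
      have hzero : PySem.Chars.rfind red ['0'] = -1 := rfind_no_zero red hz
      rw [hpop, hzero]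
      have hfill : fill110 F.2 (List.replicate red.length '1') =
          (List.replicate F.2.toNat ['1', '1', '0']).flatten ++
            List.replicate red.length '1' := by
        have h2 : F.2 = (F.2.toNat : Int) := by omega
        rw [h2, fill110_eq]
        have h3 : ((F.2.toNat : Int)).toNat = F.2.toNat := by omega
        rw [h3]
      rw [hfill, foldl_cons_rev]
      congr 1
      have h1 : PySem.List.slice red none (some ((-1 : Int) + 1)) = [] := by
        rw [PySem.List.slice_to red (by omega : (0:Int) ≤ (-1 : Int) + 1)]
        simp
      have h2 : PySem.List.slice red (some ((-1 : Int) + 1)) none = red := by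
        rw [PySem.List.slice_from red (by omega : (0:Int) ≤ (-1 : Int) + 1)]
        simp
      rw [h1, h2, PySem.List.pyRepeat]
      conv_rhs => rw [hrep]
      simp

theorem solution_foldl_eq (s : List String) : ∀ acc,
    s.foldl (fun answer string => answer ++ [solveA string]) acc = acc ++ s.map solveA := by
  induction s with
  | nil => simp
  | cons w s ih => intro acc; simp [List.foldl_cons, ih]

-- ===== VERDICT (by name: the statement is the Claim_ definition above) =====
theorem solution_spec : Claim_equal_solution := by
  intro s _hdom hpre
  unfold Spec_solution solution solution_alt
  rw [solution_foldl_eq s []]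
  simp only [List.nil_append]
  refine List.map_congr_left (fun w hw => solve_eq w ?_)
  rcases hpre w hw with h | h
  · left
    intro c hc
    simpa using List.all_eq_true.1 h c hc
  · right
    exact (PySem.Chars.isIn_eq_false_iff _ _).1 h
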